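-- pv_equiv track=rewrite | github.com/garimto81/ebs_github | tools/create_confluence_pages.py | determine_parent
-- ===== SOURCE A (Python) =====
-- PARENT_MAP = [
--     ("1. Product/Game_Rules/", "3812360338"),
--     ("1. Product/", "3811344758"),
--     ("2. Development/2.1 Frontend/", "3811606750"),
--     ("2. Development/2.2 Backend/", "3811770578"),
--     ("2. Development/2.3 Game Engine/", "3811836049"),
--     ("2. Development/2.4 Command Center/", "3811901565"),
--     ("2. Development/2.5 Shared/", "3812032646"),
--     ("4. Operations/", "3811573898"),
-- ]
--
-- def determine_parent(rel_path: str) -> str | None: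
--     """rel_path = 'docs/2.1 Frontend/Lobby/Overview.md' → parent page-id."""
--     rel = rel_path.replace("\\", "/")
--     if rel.startswith("docs/"):
--         rel = rel[5:]
--     for prefix, parent in PARENT_MAP:
--         if rel.startswith(prefix):
--             return parent
--     return None
-- ===== SOURCE B (Python) =====
-- PARENT_MAP = [
--     ("1. Product/Game_Rules/", "3812360338"),
--     ("1. Product/", "3811344758"),
--     ("2. Development/2.1 Frontend/", "3811606750"),
--     ("2. Development/2.2 Backend/", "3811770578"),
--     ("2. Development/2.3 Game Engine/", "3811836049"),
--     ("2. Development/2.4 Command Center/", "3811901565"),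
--     ("2. Development/2.5 Shared/", "3812032646"),
--     ("4. Operations/", "3811573898"),
-- ]
--
-- _PARENT_BY_PREFIX = dict(PARENT_MAP)
--
-- def determine_parent(rel_path):
--     """Longest-prefix table lookup: walk the path once, and at every '/'
--     look up the directory prefix built so far; the last (= longest) hit wins."""
--     rel = rel_path.replace("\\", "/")
--     if rel.startswith("docs/"):
--         rel = rel[5:]
--     best = None
--     prefix = ""
--     for ch in rel:
--         prefix += ch
--         if ch == "/":
--             pid = _PARENT_BY_PREFIX.get(prefix)
--             if pid is not None:
--                 best = pid
--     return best
-- ===== Notes on version B (the rewrite author's own statement) =====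
-- stated objective: idiomatic
-- what changed: Replaces the ordered startswith-scan over the prefix list with a longest-prefix table lookup: one pass that builds each slash-terminated directory prefix incrementally and returns the dict's last (= longest) hit.
import Mathlib
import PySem

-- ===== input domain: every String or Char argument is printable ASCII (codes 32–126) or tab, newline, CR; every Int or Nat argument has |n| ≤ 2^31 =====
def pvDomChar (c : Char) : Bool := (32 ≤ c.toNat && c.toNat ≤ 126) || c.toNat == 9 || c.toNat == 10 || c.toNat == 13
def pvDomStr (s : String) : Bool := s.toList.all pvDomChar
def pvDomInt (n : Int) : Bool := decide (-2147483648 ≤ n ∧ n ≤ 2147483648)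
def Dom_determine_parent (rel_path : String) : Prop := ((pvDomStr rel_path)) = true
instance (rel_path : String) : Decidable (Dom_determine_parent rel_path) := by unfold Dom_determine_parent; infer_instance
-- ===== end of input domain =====

-- B replaces A's ordered startswith-scan by a single pass over the path that looks each slash-
-- terminated prefix up in a dict and keeps the last (= longest) hit (idiomatic longest-prefix lookup).

-- ===== PORT A =====
def parentMap : List (String × String) :=
  [("1. Product/Game_Rules/", "3812360338"),
   ("1. Product/", "3811344758"),
   ("2. Development/2.1 Frontend/", "3811606750"),
   ("2. Development/2.2 Backend/", "3811770578"),
   ("2. Development/2.3 Game Engine/", "3811836049"),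
   ("2. Development/2.4 Command Center/", "3811901565"),
   ("2. Development/2.5 Shared/", "3812032646"),
   ("4. Operations/", "3811573898")]

-- the 'for prefix, parent in PARENT_MAP: if rel.startswith(prefix): return parent' loop
def aScan : List (String × String) → String → Option String
  | [], _ => none
  | (pfx, parent) :: rest, rel =>
      if PySem.Str.startswith rel pfx then some parent else aScan rest rel

def determine_parent (rel_path : String) : Option String :=
  let rel := PySem.Str.replace rel_path "\\" "/"
  let rel := if PySem.Str.startswith rel "docs/" then PySem.Str.slice rel (some 5) none else rel
  aScan parentMap rel

-- ===== PORT B =====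
def parentByPrefix : PySem.Dict String String := PySem.Dict.ofList parentMap

-- the 'for ch in rel: prefix += ch; if ch == "/": …' loop, state = (prefix, best)
def bWalk : List Char → String → Option String → Option String
  | [], _, best => best
  | c :: rest, pfx, best =>
      let pfx' := pfx.push c
      let best' :=
        if c = '/' then
          match parentByPrefix.get? pfx' with
          | some pid => some pid
          | none => best
        else best
      bWalk rest pfx' best'

def determine_parent_alt (rel_path : String) : Option String :=
  let rel := PySem.Str.replace rel_path "\\" "/"
  let rel := if PySem.Str.startswith rel "docs/" then PySem.Str.slice rel (some 5) none else rel
  bWalk rel.toList "" none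

-- ===== PRECONDITION & SPEC =====
def Spec_determine_parent (rel_path : String) (out : Option String) : Prop := out = determine_parent_alt rel_path
instance (rel_path : String) (out : Option String) : Decidable (Spec_determine_parent rel_path out) := by unfold Spec_determine_parent; infer_instance

-- ===== CLAIM (what is proved, stated in full; the proofs are below) =====
def Claim_equal_determine_parent : Prop := ∀ (rel_path : String), Dom_determine_parent rel_path → Spec_determine_parent rel_path (determine_parent rel_path)

-- ===== LEMMAS AND PROOFS =====

-- A's scan, expressed on the character list of the (already normalized) path, with the
-- prefix-length threshold n that the loop invariant for B's walk tracks.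
-- A's scan, expressed on the character list of the (already normalized) path, with a
-- prefix-length threshold n (the loop invariant for B's walk tracks it).
def pickA (full : List Char) (n : Nat) : Option String :=
  if n < 22 ∧ "1. Product/Game_Rules/".toList <+: full then some "3812360338"
  else if n < 11 ∧ "1. Product/".toList <+: full then some "3811344758"
  else if n < 28 ∧ "2. Development/2.1 Frontend/".toList <+: full then some "3811606750"
  else if n < 27 ∧ "2. Development/2.2 Backend/".toList <+: full then some "3811770578"
  else if n < 31 ∧ "2. Development/2.3 Game Engine/".toList <+: full then some "3811836049"
  else if n < 34 ∧ "2. Development/2.4 Command Center/".toList <+: full then some "3811901565"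
  else if n < 26 ∧ "2. Development/2.5 Shared/".toList <+: full then some "3812032646"
  else if n < 14 ∧ "4. Operations/".toList <+: full then some "3811573898"
  else none

theorem npre {a b full : List Char} (hab : ¬ a <+: b) (hba : ¬ b <+: a)
    (hb : b <+: full) : ¬ a <+: full :=
  fun ha => (List.prefix_or_prefix_of_prefix ha hb).elim hab hba

theorem take_eq_iff (l k : List Char) (n : Nat) (h : n ≤ l.length) :
    l.take n = k ↔ (k <+: l ∧ k.length = n) := by
  constructor
  · rintro rfl; exact ⟨List.take_prefix _ _, by simp [h]⟩
  · rintro ⟨hp, rfl⟩; exact (List.prefix_iff_eq_take.mp hp).symm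

theorem dict_get?_none (s : String) (h : ∀ kv ∈ parentMap, kv.1 ≠ s) :
    parentByPrefix.get? s = none := by
  have hd : parentByPrefix = PySem.Dict.mk parentMap := by decide
  rw [hd]
  simp [PySem.Dict.get?, List.find?_eq_none]
  intro a b hab
  exact h (a, b) hab

theorem get?_push_ne (pfx : String) (c : Char) (hc : c ≠ '/') :
    parentByPrefix.get? (pfx.push c) = none := by
  apply dict_get?_none
  intro kv hkv heq
  apply hc
  have h4 : (pfx.toList ++ [c]).getLast? = some c := by simp
  have h2 : kv.1.toList = pfx.toList ++ [c] := by rw [heq]; simp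
  rw [← h2] at h4
  fin_cases hkv <;> simp at h4 <;> first | exact h4 | exact h4.symm

theorem pickA_none (full : List Char) (n : Nat) (h : full.length ≤ n) :
    pickA full n = none := by
  unfold pickA
  split_ifs with h1 h2 h3 h4 h5 h6 h7 h8 <;> try rfl
  all_goals exfalso
  · have := h1.2.length_le; have hl : ("1. Product/Game_Rules/".toList.length) = 22 := by decide
    omega
  · have := h2.2.length_le; have hl : ("1. Product/".toList.length) = 11 := by decide
    omega
  · have := h3.2.length_le; have hl : ("2. Development/2.1 Frontend/".toList.length) = 28 := by decide
    omega
  · have := h4.2.length_le; have hl : ("2. Development/2.2 Backend/".toList.length) = 27 := by decide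
    omega
  · have := h5.2.length_le; have hl : ("2. Development/2.3 Game Engine/".toList.length) = 31 := by decide
    omega
  · have := h6.2.length_le; have hl : ("2. Development/2.4 Command Center/".toList.length) = 34 := by decide
    omega
  · have := h7.2.length_le; have hl : ("2. Development/2.5 Shared/".toList.length) = 26 := by decide
    omega
  · have := h8.2.length_le; have hl : ("4. Operations/".toList.length) = 14 := by decide
    omega

def lookupChain (full : List Char) (n : Nat) : Option String :=
  if "1. Product/Game_Rules/".toList <+: full ∧ n + 1 = 22 then some "3812360338"
  else if "1. Product/".toList <+: full ∧ n + 1 = 11 then some "3811344758"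
  else if "2. Development/2.1 Frontend/".toList <+: full ∧ n + 1 = 28 then some "3811606750"
  else if "2. Development/2.2 Backend/".toList <+: full ∧ n + 1 = 27 then some "3811770578"
  else if "2. Development/2.3 Game Engine/".toList <+: full ∧ n + 1 = 31 then some "3811836049"
  else if "2. Development/2.4 Command Center/".toList <+: full ∧ n + 1 = 34 then some "3811901565"
  else if "2. Development/2.5 Shared/".toList <+: full ∧ n + 1 = 26 then some "3812032646"
  else if "4. Operations/".toList <+: full ∧ n + 1 = 14 then some "3811573898"
  else none

theorem get?_eq_lookupChain (full : List Char) (n : Nat) (hn : n < full.length)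
    (pfx : String) (hp : pfx.toList = full.take (n + 1)) :
    parentByPrefix.get? pfx = lookupChain full n := by
  have hn1 : n + 1 ≤ full.length := hn
  by_cases c1 : "1. Product/Game_Rules/".toList <+: full ∧ n + 1 = 22
  · have htake : full.take (n + 1) = "1. Product/Game_Rules/".toList :=
      (take_eq_iff full "1. Product/Game_Rules/".toList (n + 1) hn1).mpr
        ⟨c1.1, by have hl := (by decide : ("1. Product/Game_Rules/".toList.length) = 22); have h2 := c1.2; omega⟩
    have hpfx : pfx = "1. Product/Game_Rules/" := String.toList_inj.mp (by rw [hp, htake])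
    rw [hpfx]
    have hv : parentByPrefix.get? "1. Product/Game_Rules/" = some "3812360338" := by decide
    rw [hv]
    simp only [lookupChain, eq_true c1, if_true]
  by_cases c2 : "1. Product/".toList <+: full ∧ n + 1 = 11
  · have htake : full.take (n + 1) = "1. Product/".toList :=
      (take_eq_iff full "1. Product/".toList (n + 1) hn1).mpr
        ⟨c2.1, by have hl := (by decide : ("1. Product/".toList.length) = 11); have h2 := c2.2; omega⟩
    have hpfx : pfx = "1. Product/" := String.toList_inj.mp (by rw [hp, htake])
    rw [hpfx]
    have hv : parentByPrefix.get? "1. Product/" = some "3811344758" := by decide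
    rw [hv]
    simp only [lookupChain, eq_false c1, eq_true c2, if_true, if_false]
  by_cases c3 : "2. Development/2.1 Frontend/".toList <+: full ∧ n + 1 = 28
  · have htake : full.take (n + 1) = "2. Development/2.1 Frontend/".toList :=
      (take_eq_iff full "2. Development/2.1 Frontend/".toList (n + 1) hn1).mpr
        ⟨c3.1, by have hl := (by decide : ("2. Development/2.1 Frontend/".toList.length) = 28); have h2 := c3.2; omega⟩
    have hpfx : pfx = "2. Development/2.1 Frontend/" := String.toList_inj.mp (by rw [hp, htake])
    rw [hpfx]
    have hv : parentByPrefix.get? "2. Development/2.1 Frontend/" = some "3811606750" := by decide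
    rw [hv]
    simp only [lookupChain, eq_false c1, eq_false c2, eq_true c3, if_true, if_false]
  by_cases c4 : "2. Development/2.2 Backend/".toList <+: full ∧ n + 1 = 27
  · have htake : full.take (n + 1) = "2. Development/2.2 Backend/".toList :=
      (take_eq_iff full "2. Development/2.2 Backend/".toList (n + 1) hn1).mpr
        ⟨c4.1, by have hl := (by decide : ("2. Development/2.2 Backend/".toList.length) = 27); have h2 := c4.2; omega⟩
    have hpfx : pfx = "2. Development/2.2 Backend/" := String.toList_inj.mp (by rw [hp, htake])
    rw [hpfx]
    have hv : parentByPrefix.get? "2. Development/2.2 Backend/" = some "3811770578" := by decide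
    rw [hv]
    simp only [lookupChain, eq_false c1, eq_false c2, eq_false c3, eq_true c4, if_true, if_false]
  by_cases c5 : "2. Development/2.3 Game Engine/".toList <+: full ∧ n + 1 = 31
  · have htake : full.take (n + 1) = "2. Development/2.3 Game Engine/".toList :=
      (take_eq_iff full "2. Development/2.3 Game Engine/".toList (n + 1) hn1).mpr
        ⟨c5.1, by have hl := (by decide : ("2. Development/2.3 Game Engine/".toList.length) = 31); have h2 := c5.2; omega⟩
    have hpfx : pfx = "2. Development/2.3 Game Engine/" := String.toList_inj.mp (by rw [hp, htake])
    rw [hpfx]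
    have hv : parentByPrefix.get? "2. Development/2.3 Game Engine/" = some "3811836049" := by decide
    rw [hv]
    simp only [lookupChain, eq_false c1, eq_false c2, eq_false c3, eq_false c4, eq_true c5, if_true, if_false]
  by_cases c6 : "2. Development/2.4 Command Center/".toList <+: full ∧ n + 1 = 34
  · have htake : full.take (n + 1) = "2. Development/2.4 Command Center/".toList :=
      (take_eq_iff full "2. Development/2.4 Command Center/".toList (n + 1) hn1).mpr
        ⟨c6.1, by have hl := (by decide : ("2. Development/2.4 Command Center/".toList.length) = 34); have h2 := c6.2; omega⟩
    have hpfx : pfx = "2. Development/2.4 Command Center/" := String.toList_inj.mp (by rw [hp, htake])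
    rw [hpfx]
    have hv : parentByPrefix.get? "2. Development/2.4 Command Center/" = some "3811901565" := by decide
    rw [hv]
    simp only [lookupChain, eq_false c1, eq_false c2, eq_false c3, eq_false c4, eq_false c5, eq_true c6, if_true, if_false]
  by_cases c7 : "2. Development/2.5 Shared/".toList <+: full ∧ n + 1 = 26
  · have htake : full.take (n + 1) = "2. Development/2.5 Shared/".toList :=
      (take_eq_iff full "2. Development/2.5 Shared/".toList (n + 1) hn1).mpr
        ⟨c7.1, by have hl := (by decide : ("2. Development/2.5 Shared/".toList.length) = 26); have h2 := c7.2; omega⟩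
    have hpfx : pfx = "2. Development/2.5 Shared/" := String.toList_inj.mp (by rw [hp, htake])
    rw [hpfx]
    have hv : parentByPrefix.get? "2. Development/2.5 Shared/" = some "3812032646" := by decide
    rw [hv]
    simp only [lookupChain, eq_false c1, eq_false c2, eq_false c3, eq_false c4, eq_false c5, eq_false c6, eq_true c7, if_true, if_false]
  by_cases c8 : "4. Operations/".toList <+: full ∧ n + 1 = 14
  · have htake : full.take (n + 1) = "4. Operations/".toList :=
      (take_eq_iff full "4. Operations/".toList (n + 1) hn1).mpr
        ⟨c8.1, by have hl := (by decide : ("4. Operations/".toList.length) = 14); have h2 := c8.2; omega⟩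
    have hpfx : pfx = "4. Operations/" := String.toList_inj.mp (by rw [hp, htake])
    rw [hpfx]
    have hv : parentByPrefix.get? "4. Operations/" = some "3811573898" := by decide
    rw [hv]
    simp only [lookupChain, eq_false c1, eq_false c2, eq_false c3, eq_false c4, eq_false c5, eq_false c6, eq_false c7, eq_true c8, if_true, if_false]
  · rw [dict_get?_none pfx ?hne]
    · simp only [lookupChain, eq_false c1, eq_false c2, eq_false c3, eq_false c4, eq_false c5, eq_false c6, eq_false c7, eq_false c8, if_false]
    case hne =>
      intro kv hkv heq
      have ht : full.take (n + 1) = kv.1.toList := by rw [← hp, heq]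
      have hpre := (take_eq_iff full kv.1.toList (n + 1) hn1).mp ht
      fin_cases hkv
      · exact c1 ⟨hpre.1, by have hl := (by decide : (("1. Product/Game_Rules/", "3812360338") : String × String).1.toList.length = 22); have h2 := hpre.2; omega⟩
      · exact c2 ⟨hpre.1, by have hl := (by decide : (("1. Product/", "3811344758") : String × String).1.toList.length = 11); have h2 := hpre.2; omega⟩
      · exact c3 ⟨hpre.1, by have hl := (by decide : (("2. Development/2.1 Frontend/", "3811606750") : String × String).1.toList.length = 28); have h2 := hpre.2; omega⟩
      · exact c4 ⟨hpre.1, by have hl := (by decide : (("2. Development/2.2 Backend/", "3811770578") : String × String).1.toList.length = 27); have h2 := hpre.2; omega⟩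
      · exact c5 ⟨hpre.1, by have hl := (by decide : (("2. Development/2.3 Game Engine/", "3811836049") : String × String).1.toList.length = 31); have h2 := hpre.2; omega⟩
      · exact c6 ⟨hpre.1, by have hl := (by decide : (("2. Development/2.4 Command Center/", "3811901565") : String × String).1.toList.length = 34); have h2 := hpre.2; omega⟩
      · exact c7 ⟨hpre.1, by have hl := (by decide : (("2. Development/2.5 Shared/", "3812032646") : String × String).1.toList.length = 26); have h2 := hpre.2; omega⟩
      · exact c8 ⟨hpre.1, by have hl := (by decide : (("4. Operations/", "3811573898") : String × String).1.toList.length = 14); have h2 := hpre.2; omega⟩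

theorem pickA_or (full : List Char) (n : Nat) :
    pickA full n = (pickA full (n + 1)).or (lookupChain full n) := by
  by_cases hGR : "1. Product/Game_Rules/".toList <+: full
  · have hP : "1. Product/".toList <+: full := List.IsPrefix.trans (by decide) hGR
    have hFE : ¬ "2. Development/2.1 Frontend/".toList <+: full := npre (by decide) (by decide) hGR
    have hBE : ¬ "2. Development/2.2 Backend/".toList <+: full := npre (by decide) (by decide) hGR
    have hGE : ¬ "2. Development/2.3 Game Engine/".toList <+: full := npre (by decide) (by decide) hGR
    have hCC : ¬ "2. Development/2.4 Command Center/".toList <+: full := npre (by decide) (by decide) hGR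
    have hSh : ¬ "2. Development/2.5 Shared/".toList <+: full := npre (by decide) (by decide) hGR
    have hOp : ¬ "4. Operations/".toList <+: full := npre (by decide) (by decide) hGR
    simp only [pickA, lookupChain, eq_true hGR, eq_true hP, eq_false hFE, eq_false hBE, eq_false hGE, eq_false hCC, eq_false hSh, eq_false hOp, true_and, and_true, false_and, and_false, if_false]
    split_ifs <;> first | rfl | omega
  by_cases hP : "1. Product/".toList <+: full
  · have hFE : ¬ "2. Development/2.1 Frontend/".toList <+: full := npre (by decide) (by decide) hP
    have hBE : ¬ "2. Development/2.2 Backend/".toList <+: full := npre (by decide) (by decide) hP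
    have hGE : ¬ "2. Development/2.3 Game Engine/".toList <+: full := npre (by decide) (by decide) hP
    have hCC : ¬ "2. Development/2.4 Command Center/".toList <+: full := npre (by decide) (by decide) hP
    have hSh : ¬ "2. Development/2.5 Shared/".toList <+: full := npre (by decide) (by decide) hP
    have hOp : ¬ "4. Operations/".toList <+: full := npre (by decide) (by decide) hP
    simp only [pickA, lookupChain, eq_true hP, eq_false hGR, eq_false hFE, eq_false hBE, eq_false hGE, eq_false hCC, eq_false hSh, eq_false hOp, true_and, and_true, false_and, and_false, if_false]
    split_ifs <;> first | rfl | omega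
  by_cases hFE : "2. Development/2.1 Frontend/".toList <+: full
  · have hBE : ¬ "2. Development/2.2 Backend/".toList <+: full := npre (by decide) (by decide) hFE
    have hGE : ¬ "2. Development/2.3 Game Engine/".toList <+: full := npre (by decide) (by decide) hFE
    have hCC : ¬ "2. Development/2.4 Command Center/".toList <+: full := npre (by decide) (by decide) hFE
    have hSh : ¬ "2. Development/2.5 Shared/".toList <+: full := npre (by decide) (by decide) hFE
    have hOp : ¬ "4. Operations/".toList <+: full := npre (by decide) (by decide) hFE
    simp only [pickA, lookupChain, eq_true hFE, eq_false hGR, eq_false hP, eq_false hBE, eq_false hGE, eq_false hCC, eq_false hSh, eq_false hOp, true_and, and_true, false_and, and_false, if_false]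
    split_ifs <;> first | rfl | omega
  by_cases hBE : "2. Development/2.2 Backend/".toList <+: full
  · have hGE : ¬ "2. Development/2.3 Game Engine/".toList <+: full := npre (by decide) (by decide) hBE
    have hCC : ¬ "2. Development/2.4 Command Center/".toList <+: full := npre (by decide) (by decide) hBE
    have hSh : ¬ "2. Development/2.5 Shared/".toList <+: full := npre (by decide) (by decide) hBE
    have hOp : ¬ "4. Operations/".toList <+: full := npre (by decide) (by decide) hBE
    simp only [pickA, lookupChain, eq_true hBE, eq_false hGR, eq_false hP, eq_false hFE, eq_false hGE, eq_false hCC, eq_false hSh, eq_false hOp, true_and, and_true, false_and, and_false, if_false]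
    split_ifs <;> first | rfl | omega
  by_cases hGE : "2. Development/2.3 Game Engine/".toList <+: full
  · have hCC : ¬ "2. Development/2.4 Command Center/".toList <+: full := npre (by decide) (by decide) hGE
    have hSh : ¬ "2. Development/2.5 Shared/".toList <+: full := npre (by decide) (by decide) hGE
    have hOp : ¬ "4. Operations/".toList <+: full := npre (by decide) (by decide) hGE
    simp only [pickA, lookupChain, eq_true hGE, eq_false hGR, eq_false hP, eq_false hFE, eq_false hBE, eq_false hCC, eq_false hSh, eq_false hOp, true_and, and_true, false_and, and_false, if_false]
    split_ifs <;> first | rfl | omega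
  by_cases hCC : "2. Development/2.4 Command Center/".toList <+: full
  · have hSh : ¬ "2. Development/2.5 Shared/".toList <+: full := npre (by decide) (by decide) hCC
    have hOp : ¬ "4. Operations/".toList <+: full := npre (by decide) (by decide) hCC
    simp only [pickA, lookupChain, eq_true hCC, eq_false hGR, eq_false hP, eq_false hFE, eq_false hBE, eq_false hGE, eq_false hSh, eq_false hOp, true_and, and_true, false_and, and_false, if_false]
    split_ifs <;> first | rfl | omega
  by_cases hSh : "2. Development/2.5 Shared/".toList <+: full
  · have hOp : ¬ "4. Operations/".toList <+: full := npre (by decide) (by decide) hSh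
    simp only [pickA, lookupChain, eq_true hSh, eq_false hGR, eq_false hP, eq_false hFE, eq_false hBE, eq_false hGE, eq_false hCC, eq_false hOp, true_and, and_true, false_and, and_false, if_false]
    split_ifs <;> first | rfl | omega
  by_cases hOp : "4. Operations/".toList <+: full
  · 
    simp only [pickA, lookupChain, eq_true hOp, eq_false hGR, eq_false hP, eq_false hFE, eq_false hBE, eq_false hGE, eq_false hCC, eq_false hSh, true_and, and_true, false_and, and_false, if_false]
    split_ifs <;> first | rfl | omega
  simp only [pickA, lookupChain, eq_false hGR, eq_false hP, eq_false hFE, eq_false hBE, eq_false hGE, eq_false hCC, eq_false hSh, eq_false hOp, false_and, and_false, if_false]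
  rfl

theorem bWalk_eq (chars : List Char) : ∀ (pfx : String) (best : Option String),
    bWalk chars pfx best = (pickA (pfx.toList ++ chars) pfx.toList.length).or best := by
  induction chars with
  | nil =>
    intro pfx best
    rw [bWalk, pickA_none _ _ (by simp)]
    rfl
  | cons c rest ih =>
    intro pfx best
    rw [bWalk, ih]
    have htl : (pfx.push c).toList = pfx.toList ++ [c] := by simp
    have hfull : (pfx.push c).toList ++ rest = pfx.toList ++ c :: rest := by simp [htl]
    have hlen : (pfx.push c).toList.length = pfx.toList.length + 1 := by simp [htl]
    have hn : pfx.toList.length < (pfx.toList ++ c :: rest).length := by simp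
    have hp' : (pfx.push c).toList = (pfx.toList ++ c :: rest).take (pfx.toList.length + 1) := by
      rw [htl]
      rw [show pfx.toList.length + 1 = pfx.toList.length + 1 from rfl]
      rw [List.take_append]
      simp
    rw [hfull, hlen, pickA_or (pfx.toList ++ c :: rest) pfx.toList.length, Option.or_assoc]
    congr 1
    have hg : parentByPrefix.get? (pfx.push c) = lookupChain (pfx.toList ++ c :: rest) pfx.toList.length :=
      get?_eq_lookupChain _ _ hn _ hp'
    by_cases hc : c = '/'
    · rw [if_pos hc, hg]
      cases lookupChain (pfx.toList ++ c :: rest) pfx.toList.length <;> rfl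
    · rw [if_neg hc, ← hg, get?_push_ne pfx c hc]
      rfl

theorem aScan_eq (rel : String) : aScan parentMap rel = pickA rel.toList 0 := by
  norm_num [aScan, parentMap, pickA, PySem.Chars.startswith_iff]

theorem main_eq (rel : String) : aScan parentMap rel = bWalk rel.toList "" none := by
  rw [aScan_eq, bWalk_eq]
  simp

-- ===== VERDICT (by name: the statement is the Claim_ definition above) =====
theorem determine_parent_spec : Claim_equal_determine_parent := by
  intro rel_path _
  unfold Spec_determine_parent determine_parent determine_parent_alt
  exact main_eq _
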